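-- pv_equiv track=rewrite | github.com/earthlab/cross-sensor-cal | tools/summarize_ty_tuff_contribs.py | group_by_month
-- ===== SOURCE A (Python) =====
-- from collections import defaultdict, Counter
--
-- def group_by_month(commits):
--     grouped = defaultdict(list)
--     for entry in commits:
--         month = entry["date"][:7]
--         grouped[month].append(entry)
--     for month_entries in grouped.values():
--         month_entries.sort(key=lambda c: c["date"], reverse=True)
--     return dict(sorted(grouped.items(), reverse=True))
-- ===== SOURCE B (Python) =====
-- def group_by_month(commits):
--     months = sorted({c["date"][:7] for c in commits}, reverse=True)
--     return {
--         m: sorted((c for c in commits if c["date"][:7] == m),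
--                   key=lambda c: c["date"], reverse=True)
--         for m in months
--     }
-- ===== Notes on version B (the rewrite author's own statement) =====
-- stated objective: simpler
-- what changed: A builds buckets with a defaultdict, then sorts each bucket in place and finally sorts the items; B computes the sorted distinct month keys once and builds the result in one dict comprehension that filters-and-sorts the commits for each month, with no defaultdict and no in-place mutation.
import Mathlib
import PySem

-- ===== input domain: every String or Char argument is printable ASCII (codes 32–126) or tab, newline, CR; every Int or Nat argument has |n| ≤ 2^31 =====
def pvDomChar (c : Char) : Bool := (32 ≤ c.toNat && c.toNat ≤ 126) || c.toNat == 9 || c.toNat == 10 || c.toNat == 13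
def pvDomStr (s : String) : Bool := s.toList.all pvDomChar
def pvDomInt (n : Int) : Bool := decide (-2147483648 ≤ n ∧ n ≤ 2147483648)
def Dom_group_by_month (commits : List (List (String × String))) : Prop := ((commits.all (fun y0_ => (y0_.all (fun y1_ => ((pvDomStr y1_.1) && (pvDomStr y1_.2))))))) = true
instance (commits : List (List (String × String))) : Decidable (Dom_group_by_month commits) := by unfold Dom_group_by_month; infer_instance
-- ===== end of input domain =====

-- B replaces A's defaultdict/bucket-mutation shape by sorted distinct month keys plus a
-- per-month filter-and-sort comprehension (different decomposition, similar cost).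


-- ===== PORT A =====
-- entry["date"]  (Pre_ guarantees the key is present, so the getD default is never used)
def pvDate (e : List (String × String)) : String :=
  ((PySem.Dict.mk e).get? "date").getD ""

-- entry["date"][:7]
def pvMonth (e : List (String × String)) : String :=
  PySem.Str.slice (pvDate e) none (some 7)

def group_by_month (commits : List (List (String × String))) : List (String × List (List (String × String))) :=
  -- grouped = defaultdict(list); for entry: grouped[month].append(entry)
  let grouped := commits.foldl
    (fun d e => d.modify (pvMonth e) [] (fun v => v ++ [e])) PySem.Dict.empty
  -- for month_entries in grouped.values(): month_entries.sort(key=date, reverse=True)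
  let grouped2 := PySem.Dict.mk
    (grouped.items.map (fun p => (p.1, PySem.List.sorted p.2 pvDate true)))
  -- dict(sorted(grouped.items(), reverse=True)); the dict's keys are distinct, so
  -- Python's tuple comparison only ever compares the month strings: sort keyed on the month
  PySem.List.sorted grouped2.items (fun p => p.1) true

-- ===== PORT B =====
def group_by_month_alt (commits : List (List (String × String))) : List (String × List (List (String × String))) :=
  -- months = sorted({c["date"][:7] for c in commits}, reverse=True)
  let months := PySem.List.sorted (PySem.Set.ofList (commits.map pvMonth)) (fun m => m) true
  -- {m: sorted((c for c in commits if c["date"][:7] == m), key=date, reverse=True) for m in months}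
  months.map (fun m =>
    (m, PySem.List.sorted (commits.filter (fun c => pvMonth c == m)) pvDate true))

-- ===== PRECONDITION & SPEC =====
-- Pre_ excludes exactly the inputs containing an entry without a "date" key, on which the
-- Python A raises KeyError (and B raises KeyError too).
def Pre_group_by_month (commits : List (List (String × String))) : Prop :=
  ∀ e ∈ commits, (PySem.Dict.mk e).contains "date" = true
instance (commits : List (List (String × String))) : Decidable (Pre_group_by_month commits) := by
  unfold Pre_group_by_month; infer_instance

def pvWitness_group_by_month : (List (List (String × String))) :=
  [[("date", "2024-02-01 10:00"), ("msg", "a")], [("date", "2024-01-05 09:00"), ("msg", "b")]]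

def Spec_group_by_month (commits : List (List (String × String))) (out : List (String × List (List (String × String)))) : Prop := out = group_by_month_alt commits
instance (commits : List (List (String × String))) (out : List (String × List (List (String × String)))) : Decidable (Spec_group_by_month commits out) := by unfold Spec_group_by_month; infer_instance

-- ===== CLAIM (what is proved, stated in full; the proofs are below) =====
def Claim_equal_group_by_month : Prop := ∀ (commits : List (List (String × String))), Dom_group_by_month commits → Pre_group_by_month commits → Spec_group_by_month commits (group_by_month commits)

-- ===== LEMMAS AND PROOFS =====

-- A's grouping fold, named for the proofs.
def pvGrouped (commits : List (List (String × String))) : PySem.Dict String (List (List (String × String))) :=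
  commits.foldl (fun d e => d.modify (pvMonth e) [] (fun v => v ++ [e])) PySem.Dict.empty

theorem pvGrouped_keys (commits : List (List (String × String))) :
    (pvGrouped commits).keys = PySem.Set.ofList (commits.map pvMonth) := by
  unfold pvGrouped
  rw [PySem.Dict.keys_foldl_modify_key]
  simp [PySem.Set.ofList_eq_foldl, PySem.Set.update]

theorem pvGrouped_keys_nodup (commits : List (List (String × String))) :
    (pvGrouped commits).keys.Nodup := by
  unfold pvGrouped
  exact PySem.Dict.nodup_keys_foldl_modify_key _ _ _ _ _ (by simp)

theorem pvGrouped_getD (commits : List (List (String × String))) (m : String) :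
    (pvGrouped commits).getD m [] = commits.filter (fun c => pvMonth c == m) := by
  unfold pvGrouped
  have h : commits.foldl (fun d e => d.modify (pvMonth e) [] (fun v => v ++ [e])) PySem.Dict.empty
      = (commits.map (fun e => (pvMonth e, e))).foldl
          (fun d p => d.modify p.1 [] (fun v => v ++ [p.2])) PySem.Dict.empty := by
    rw [List.foldl_map]
  rw [h, PySem.Dict.getD_foldl_modify_append]
  simp [List.filter_map, Function.comp_def]

-- sorting pairs with distinct first components by the first component
-- = mapping the pair constructor over the sorted keys
theorem pv_sorted_map_fst {V : Type} (keys : List String) (g : String → String × V)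
    (hg : ∀ k, (g k).1 = k) (hnd : keys.Nodup) :
    PySem.List.sorted (keys.map g) (fun p => p.1) true
      = (PySem.List.sorted keys (fun m => m) true).map g := by
  apply PySem.List.sorted_rev_eq_of_perm_of_pairwise_gt
  · exact (PySem.List.sorted_perm keys (fun m => m) true).map g
  · have hle : (PySem.List.sorted keys (fun m => m) true).Pairwise (fun a b => b ≤ a) :=
      PySem.List.sorted_pairwise_rev keys (fun m => m)
    have hne : (PySem.List.sorted keys (fun m => m) true).Nodup :=
      ((PySem.List.sorted_perm keys (fun m => m) true)).nodup_iff.mpr hnd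
    have hlt : (PySem.List.sorted keys (fun m => m) true).Pairwise (fun a b => b < a) :=
      (hle.and hne).imp (fun h => lt_of_le_of_ne h.1 (fun hba => h.2 hba.symm))
    rw [List.pairwise_map]
    exact hlt.imp (fun h => by simpa [hg] using h)

-- ===== VERDICT (by name: the statement is the Claim_ definition above) =====
theorem group_by_month_spec : Claim_equal_group_by_month := by
  intro commits _ _
  unfold Spec_group_by_month group_by_month group_by_month_alt
  have hitems : (pvGrouped commits).items
      = (pvGrouped commits).keys.map (fun k => (k, (pvGrouped commits).getD k [])) :=
    PySem.Dict.items_eq_map_keys _ (pvGrouped_keys_nodup commits) []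
  show PySem.List.sorted
      ((pvGrouped commits).items.map (fun p => (p.1, PySem.List.sorted p.2 pvDate true)))
      (fun p => p.1) true = _
  rw [hitems, List.map_map]
  have hfun : ((fun p : String × List (List (String × String)) =>
        (p.1, PySem.List.sorted p.2 pvDate true)) ∘
        (fun k => (k, (pvGrouped commits).getD k [])))
      = fun m => (m, PySem.List.sorted (commits.filter (fun c => pvMonth c == m)) pvDate true) := by
    funext m
    simp [Function.comp, pvGrouped_getD]
  rw [hfun, pv_sorted_map_fst _ _ (fun k => rfl) (pvGrouped_keys_nodup commits),
      pvGrouped_keys]
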